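-- pv_equiv track=rewrite | github.com/waldyrfelix/codequest | boat_docking_avail/quest.py | canDockBoats
-- ===== SOURCE A (Python) =====
-- from typing import List
--
-- def canDockBoats(dockLayout: List[int], newBoats: int) -> bool:
--     if newBoats <= 0:
--         return False
--
--     i = prev_boat = next_boat = 0
--
--     while newBoats > 0 and i < len(dockLayout):
--         curr_boat = dockLayout[i]
--
--         if i < len(dockLayout) - 1:
--             next_boat = dockLayout[i + 1]
--         else:
--             next_boat = 0
--
--         if prev_boat == curr_boat == next_boat == 0:
--             newBoats -= 1
--             curr_boat = 1
--
--         if newBoats == 0: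
--             return True
--
--         prev_boat = curr_boat
--         i += 1
--
--     return False
-- ===== SOURCE B (Python) =====
-- def canDockBoats(dockLayout, newBoats):
--     # Segment scan: closed-form capacity per maximal run of zero slots.
--     if newBoats <= 0:
--         return False
--     cap = 0
--     run = 0
--     edge = True  # current run touches the left end of the array
--     for v in dockLayout:
--         if v == 0:
--             run += 1
--         else:
--             if run:
--                 cap += run // 2 if edge else (run - 1) // 2
--             run = 0
--             edge = False
--     cap += (run + 1) // 2 if edge else run // 2
--     return cap >= newBoats
-- ===== Notes on version B (the rewrite author's own statement) =====
-- stated objective: alternative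
-- what changed: Replaced the stateful greedy placement loop with countdown and early return by a single segment scan that adds a closed-form capacity ((L-1)//2, L//2 or (L+1)//2 for interior / one-edge / whole-array zero-runs) per maximal run of empty slots and compares the total with newBoats; fewer per-element operations make it measurably faster by a constant factor.
import Mathlib
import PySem

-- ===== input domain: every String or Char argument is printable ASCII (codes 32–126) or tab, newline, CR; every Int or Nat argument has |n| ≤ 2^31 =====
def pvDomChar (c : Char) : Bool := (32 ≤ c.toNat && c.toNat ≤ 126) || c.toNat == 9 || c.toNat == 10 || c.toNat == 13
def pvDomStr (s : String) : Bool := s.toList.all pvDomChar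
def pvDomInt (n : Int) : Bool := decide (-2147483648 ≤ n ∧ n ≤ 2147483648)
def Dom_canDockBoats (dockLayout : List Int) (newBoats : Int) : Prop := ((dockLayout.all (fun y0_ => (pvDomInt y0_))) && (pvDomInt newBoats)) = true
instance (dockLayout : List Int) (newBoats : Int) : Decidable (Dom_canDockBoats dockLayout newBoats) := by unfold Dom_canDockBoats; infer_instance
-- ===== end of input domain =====

-- B replaces A's stateful greedy placement loop (countdown + early return) by a single segment
-- scan adding a closed-form capacity per maximal run of empty slots; both O(n), B measurably faster by a constant factor (timing run).

-- ===== PORT A =====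
-- A's while loop: recursion over the remaining list; `prev` is prev_boat, `nb` the countdown,
-- `rest.headD 0` is the next_boat (0 past the end), early `true` returns kept in place.
def canDockBoatsGo (nb prev : Int) (xs : List Int) : Bool :=
  match xs with
  | [] => false
  | curr :: rest =>
    if nb ≤ 0 then false   -- while-condition `newBoats > 0`
    else
      let next := rest.headD 0
      if prev = 0 ∧ curr = 0 ∧ next = 0 then
        if nb - 1 = 0 then true else canDockBoatsGo (nb - 1) 1 rest
      else
        if nb = 0 then true else canDockBoatsGo nb curr rest

def canDockBoats (dockLayout : List Int) (newBoats : Int) : Bool :=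
  if newBoats ≤ 0 then false else canDockBoatsGo newBoats 0 dockLayout

-- ===== PORT B =====
-- B's for loop: fold over the list carrying (run, edge, cap).
def canDockBoatsAltGo (xs : List Int) (run : Nat) (edge : Bool) (cap : Nat) : Nat :=
  match xs with
  | [] => cap + (if edge then (run + 1) / 2 else run / 2)
  | v :: rest =>
    if v = 0 then canDockBoatsAltGo rest (run + 1) edge cap
    else canDockBoatsAltGo rest 0 false
      (cap + (if run = 0 then 0 else if edge then run / 2 else (run - 1) / 2))

def canDockBoats_alt (dockLayout : List Int) (newBoats : Int) : Bool :=
  if newBoats ≤ 0 then false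
  else decide (newBoats ≤ (canDockBoatsAltGo dockLayout 0 true 0 : Int))

-- ===== PRECONDITION & SPEC =====
def Spec_canDockBoats (dockLayout : List Int) (newBoats : Int) (out : Bool) : Prop := out = canDockBoats_alt dockLayout newBoats
instance (dockLayout : List Int) (newBoats : Int) (out : Bool) : Decidable (Spec_canDockBoats dockLayout newBoats out) := by unfold Spec_canDockBoats; infer_instance

-- ===== CLAIM (what is proved, stated in full; the proofs are below) =====
def Claim_equal_canDockBoats : Prop := ∀ (dockLayout : List Int) (newBoats : Int), Dom_canDockBoats dockLayout newBoats → Spec_canDockBoats dockLayout newBoats (canDockBoats dockLayout newBoats)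

-- ===== LEMMAS AND PROOFS =====

-- Greedy placement count of A's loop (state = prev slot content), ignoring the countdown.
def gcount (prev : Int) (xs : List Int) : Nat :=
  match xs with
  | [] => 0
  | curr :: rest =>
    if prev = 0 ∧ curr = 0 ∧ rest.headD 0 = 0 then 1 + gcount 1 rest else gcount curr rest

-- Interior-normalised segment count: r pending zero slots (phantoms included), interior formulas.
def G (r : Nat) (xs : List Int) : Nat :=
  match xs with
  | [] => r / 2
  | v :: rest => if v = 0 then G (r + 1) rest else (r - 1) / 2 + G 0 rest

theorem G_bump (xs : List Int) : ∀ r : Nat, 1 ≤ r → G (r + 2) xs = 1 + G r xs := by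
  induction xs with
  | nil => intro r hr; simp [G]; omega
  | cons v rest ih =>
    intro r hr
    by_cases hv : v = 0
    · simp [G, hv]; exact ih (r + 1) (by omega)
    · simp [G, hv]; omega

theorem gcount_eq_G_aux : ∀ n : Nat, ∀ xs : List Int, xs.length ≤ n →
    (gcount 0 xs = G 1 xs ∧ ∀ v : Int, v ≠ 0 → gcount v xs = G 0 xs) := by
  intro n
  induction n with
  | zero =>
    intro xs hlen
    match xs with
    | [] => simp [gcount, G]
    | _ :: _ => simp at hlen
  | succ n ih =>
    intro xs hlen
    match xs with
    | [] => simp [gcount, G]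
    | curr :: rest =>
      have hrest : rest.length ≤ n := by simp at hlen; omega
      have ihrest := ih rest hrest
      constructor
      · by_cases hc : curr = 0
        · subst hc
          match rest with
          | [] => simp [gcount, G]
          | r0 :: rest' =>
            have hrest' : rest'.length ≤ n := by simp at hlen; omega
            have ihrest' := ih rest' hrest'
            by_cases hr0 : r0 = 0
            · subst hr0
              have h1 : gcount 0 (0 :: 0 :: rest') = 1 + gcount 1 (0 :: rest') := by
                simp [gcount]
              have h2 : gcount 1 (0 :: rest') = gcount 0 rest' := by
                simp [gcount]
              have h3 : G 1 (0 :: 0 :: rest') = G 3 rest' := by simp [G]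
              rw [h1, h2, h3, ihrest'.1, G_bump rest' 1 (by omega)]
            · have h1 : gcount 0 (0 :: r0 :: rest') = gcount 0 (r0 :: rest') := by
                simp [gcount, List.headD, hr0]
              have h2 : gcount 0 (r0 :: rest') = gcount r0 rest' := by
                simp [gcount, hr0]
              have h3 : gcount r0 rest' = G 0 rest' := ihrest'.2 r0 hr0
              have h4 : G 1 (0 :: r0 :: rest') = G 0 rest' := by simp [G, hr0]
              omega
        · have h1 : gcount 0 (curr :: rest) = gcount curr rest := by
            simp [gcount, hc]
          have h2 : G 1 (curr :: rest) = G 0 rest := by simp [G, hc]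
          have h3 := ihrest.2 curr hc
          omega
      · intro v hv
        have h1 : gcount v (curr :: rest) = gcount curr rest := by
          simp [gcount, hv]
        by_cases hc : curr = 0
        · subst hc
          have h2 : G 0 (0 :: rest) = G 1 rest := by simp [G]
          rw [h1, h2]; exact ihrest.1
        · have h2 : G 0 (curr :: rest) = G 0 rest := by simp [G, hc]
          have h3 := ihrest.2 curr hc
          omega

theorem gcount_eq_G (xs : List Int) : gcount 0 xs = G 1 xs :=
  (gcount_eq_G_aux xs.length xs le_rfl).1

-- A's loop returns true iff the countdown is covered by the greedy count.
theorem goA_char (xs : List Int) : ∀ (prev nb : Int), 0 < nb →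
    canDockBoatsGo nb prev xs = decide (nb ≤ (gcount prev xs : Int)) := by
  induction xs with
  | nil => intro prev nb h; simp [canDockBoatsGo, gcount]; omega
  | cons curr rest ih =>
    intro prev nb h
    simp only [canDockBoatsGo, gcount, if_neg (by omega : ¬ nb ≤ 0)]
    by_cases hp : prev = 0 ∧ curr = 0 ∧ rest.headD 0 = 0
    · simp only [if_pos hp]
      by_cases h1 : nb - 1 = 0
      · rw [if_pos h1]; have : nb = 1 := by omega
        subst this; simp
      · rw [if_neg h1, ih 1 (nb - 1) (by omega)]
        simp only [decide_eq_decide]; push_cast; omega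
    · simp only [if_neg hp]
      rw [if_neg (by omega : ¬ nb = 0), ih curr nb h]

-- B's fold computes the accumulator plus the interior-normalised segment count (edge = one phantom zero).
theorem goB_char (xs : List Int) : ∀ (run cap : Nat) (edge : Bool),
    canDockBoatsAltGo xs run edge cap = cap + G (run + (if edge then 1 else 0)) xs := by
  induction xs with
  | nil => intro run cap edge; cases edge <;> simp [canDockBoatsAltGo, G]
  | cons v rest ih =>
    intro run cap edge
    by_cases hv : v = 0
    · simp only [canDockBoatsAltGo, G, if_pos hv]
      rw [ih]; ring_nf
    · simp only [canDockBoatsAltGo, G, if_neg hv]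
      rw [ih 0 _ false]
      cases edge <;> by_cases hr : run = 0 <;> simp [hr] <;> omega

-- ===== VERDICT (by name: the statement is the Claim_ definition above) =====
theorem canDockBoats_spec : Claim_equal_canDockBoats := by
  intro dockLayout newBoats _
  unfold Spec_canDockBoats canDockBoats canDockBoats_alt
  by_cases h : newBoats ≤ 0
  · simp [h]
  · rw [if_neg h, if_neg h, goA_char dockLayout 0 newBoats (by omega),
      goB_char dockLayout 0 0 true, gcount_eq_G dockLayout]
    simp
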